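-- pv_equiv track=rewrite | github.com/zazabap/problem-reductions | docs/paper/verify-reductions/verify_partition_sequencing_to_minimize_tardy_task_weight.py | partition_feasible_brute
-- ===== SOURCE A (Python) =====
-- def partition_feasible_brute(sizes):
--     """Check if a balanced partition exists (brute force)."""
--     n = len(sizes)
--     B = sum(sizes)
--     if B % 2 != 0:
--         return False, None
--     target = B // 2
--     for mask in range(1 << n):
--         s = sum(sizes[i] for i in range(n) if mask & (1 << i))
--         if s == target:
--             config = [(mask >> i) & 1 for i in range(n)]
--             return True, config
--     return False, None
-- ===== SOURCE B (Python) =====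
-- def partition_feasible_brute(sizes):
--     """Check if a balanced partition exists (DFS over bits, high index first, 0 before 1)."""
--     total = sum(sizes)
--     if total % 2 != 0:
--         return False, None
--     n = len(sizes)
--     # stack entry (k, t, bits): bits already decided for indices n-1..k (high first),
--     # t = remaining sum to realize among sizes[0:k]
--     stack = [(n, total // 2, [])]
--     while stack:
--         k, t, bits = stack.pop()
--         if k == 0:
--             if t == 0:
--                 return True, bits[::-1]
--             continue
--         stack.append((k - 1, t - sizes[k - 1], bits + [1]))
--         stack.append((k - 1, t, bits + [0]))
--     return False, None
-- ===== Notes on version B (the rewrite author's own statement) =====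
-- stated objective: alternative
-- what changed: Replaced the scan over all 2^n bitmasks (each subset sum recomputed from scratch) by an explicit-stack DFS that decides bits from the highest index down, trying 0 before 1, so it stops at the first (numerically smallest) solution.
import Mathlib
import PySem

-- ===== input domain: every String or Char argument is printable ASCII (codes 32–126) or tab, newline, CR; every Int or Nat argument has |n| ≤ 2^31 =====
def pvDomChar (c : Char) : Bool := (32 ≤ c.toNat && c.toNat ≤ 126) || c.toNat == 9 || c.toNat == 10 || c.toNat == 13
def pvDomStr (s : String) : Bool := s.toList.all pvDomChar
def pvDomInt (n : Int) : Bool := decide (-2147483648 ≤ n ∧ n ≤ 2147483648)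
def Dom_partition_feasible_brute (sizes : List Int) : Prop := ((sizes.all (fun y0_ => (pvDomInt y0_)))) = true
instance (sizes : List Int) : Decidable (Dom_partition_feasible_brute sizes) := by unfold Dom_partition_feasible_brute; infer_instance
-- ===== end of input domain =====

-- B replaces A's scan of all 2^n bitmasks by an explicit-stack DFS deciding bits
-- high-to-low (0 before 1), stopping at the first = numerically smallest matching mask;
-- proved equal on all inputs.


-- ===== PORT A =====
-- s = sum(sizes[i] for i in range(n) if mask & (1 << i)); the masks produced by
-- range(1 << n) are exactly the naturals below 2^n, so the loop counter is ported as a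
-- Nat with Nat bit operations (exact there).
def pvMaskSum (sizes : List Int) (mask : Nat) : Int :=
  (List.range sizes.length).foldl
    (fun acc i => if mask &&& (1 <<< i) != 0 then acc + sizes.getD i 0 else acc) 0

-- config = [(mask >> i) & 1 for i in range(n)]
def pvConfig (n : Nat) (mask : Nat) : List Int :=
  (List.range n).map (fun i => (((mask >>> i) &&& 1 : Nat) : Int))

-- the 'for mask in range(1 << n)' loop with its early return
def pvLoopA (sizes : List Int) (target : Int) : List Nat → Bool × Option (List Int)
  | [] => (false, none)
  | m :: ms =>
    if pvMaskSum sizes m = target then (true, some (pvConfig sizes.length m))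
    else pvLoopA sizes target ms

def partition_feasible_brute (sizes : List Int) : Bool × Option (List Int) :=
  let n := sizes.length
  let B := sizes.sum
  if PySem.Int.mod B 2 ≠ 0 then (false, none)
  else pvLoopA sizes (PySem.Int.floordiv B 2) (List.range (1 <<< n))

-- ===== PORT B =====
-- the 'while stack' DFS loop: entry (k, t, bits) = bits already decided for indices
-- n-1..k (high index first), t the remaining sum to realize among sizes[0:k]; the
-- 0-branch is pushed last so it is popped first (0 tried before 1).
def pvLoopB (sizes : List Int) : List (Nat × Int × List Int) → Bool × Option (List Int)
  | [] => (false, none)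
  | (0, t, bits) :: st =>
    if t = 0 then (true, some bits.reverse) else pvLoopB sizes st
  | (k + 1, t, bits) :: st =>
    pvLoopB sizes ((k, t, bits ++ [0]) :: (k, t - sizes.getD k 0, bits ++ [1]) :: st)
termination_by st => (st.map (fun e => 3 ^ e.1)).sum
decreasing_by
  · simp only [List.map_cons, List.sum_cons]
    omega
  · simp only [List.map_cons, List.sum_cons, pow_succ]
    have h3 : 0 < 3 ^ k := by positivity
    omega

def partition_feasible_brute_alt (sizes : List Int) : Bool × Option (List Int) :=
  let B := sizes.sum
  if PySem.Int.mod B 2 ≠ 0 then (false, none)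
  else pvLoopB sizes [(sizes.length, PySem.Int.floordiv B 2, [])]

-- ===== PRECONDITION & SPEC =====
def Spec_partition_feasible_brute (sizes : List Int) (out : Bool × Option (List Int)) : Prop := out = partition_feasible_brute_alt sizes
instance (sizes : List Int) (out : Bool × Option (List Int)) : Decidable (Spec_partition_feasible_brute sizes out) := by unfold Spec_partition_feasible_brute; infer_instance

-- ===== CLAIM (what is proved, stated in full; the proofs are below) =====
def Claim_equal_partition_feasible_brute : Prop := ∀ (sizes : List Int), Dom_partition_feasible_brute sizes → Spec_partition_feasible_brute sizes (partition_feasible_brute sizes)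

-- ===== LEMMAS AND PROOFS =====

-- proof-side characterisation of one DFS stack entry: first (smallest, 0-before-1) bit
-- list [bit_{k-1}, ..., bit_0] over the reversed k-prefix with subset sum t
def pvSolve (t : Int) : List Int → Option (List Int)
  | [] => if t = 0 then some [] else none
  | x :: rest =>
    match pvSolve t rest with
    | some c => some (0 :: c)
    | none => (pvSolve (t - x) rest).map (fun c => 1 :: c)

def pvStackRes (sizes : List Int) : List (Nat × Int × List Int) → Bool × Option (List Int)
  | [] => (false, none)
  | (k, t, bits) :: st =>
    match pvSolve t ((sizes.take k).reverse) with
    | some c => (true, some ((bits ++ c).reverse))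
    | none => pvStackRes sizes st

lemma loopB_eq_stackRes (sizes : List Int) (st : List (Nat × Int × List Int)) :
    (∀ e ∈ st, e.1 ≤ sizes.length) → pvLoopB sizes st = pvStackRes sizes st := by
  induction st using pvLoopB.induct sizes with
  | case1 =>
    intro _
    simp [pvLoopB, pvStackRes]
  | case2 bits st =>
    intro _
    simp [pvLoopB, pvStackRes, pvSolve]
  | case3 t bits st ht ih =>
    intro h
    rw [pvLoopB, pvStackRes, if_neg ht]
    show _ = match pvSolve t (([] : List Int)).reverse with
      | some c => (true, some ((bits ++ c).reverse))
      | none => pvStackRes sizes st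
    rw [show pvSolve t (([] : List Int)).reverse = none by simp [pvSolve, ht]]
    exact ih (fun e he => h e (List.mem_cons_of_mem _ he))
  | case4 k t bits st ih =>
    intro h
    have hk : k < sizes.length := by
      have := h (k + 1, t, bits) List.mem_cons_self
      simpa using this
    have htake : (sizes.take (k + 1)).reverse = sizes.getD k 0 :: (sizes.take k).reverse := by
      rw [List.take_add_one, List.getElem?_eq_getElem hk, List.reverse_append]
      simp [List.getD, List.getElem?_eq_getElem hk]
    rw [pvLoopB, ih (by
      intro e he
      simp only [List.mem_cons] at he
      rcases he with he | he | he
      · subst he; exact hk.le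
      · subst he; exact hk.le
      · exact h e (List.mem_cons_of_mem _ he))]
    rw [pvStackRes, pvStackRes, pvStackRes, htake, pvSolve]
    cases hc : pvSolve t ((sizes.take k).reverse) with
    | some c => simp
    | none =>
      cases hc2 : pvSolve (t - sizes.getD k 0) ((sizes.take k).reverse) with
      | some c => simp
      | none => simp

-- A's loop is find-first over the mask list
lemma loopA_eq_find (s : List Int) (t : Int) (ms : List Nat) :
    pvLoopA s t ms =
      match ms.find? (fun m => pvMaskSum s m == t) with
      | some m => (true, some (pvConfig s.length m))
      | none => (false, none) := by
  induction ms with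
  | nil => rfl
  | cons m ms ih =>
    by_cases h : pvMaskSum s m = t
    · simp [pvLoopA, h]
    · simp [pvLoopA, h, ih]

-- bit facts, via div/mod
lemma divmod_low (n m i : Nat) (hi : i < n) : (2^n+m)/2^i%2 = m/2^i%2 := by
  obtain ⟨k, rfl⟩ : ∃ k, n = i + 1 + k := ⟨n - (i+1), by omega⟩
  have h2 : (2:Nat)^(i+1+k) = 2^i * (2 * 2^k) := by ring
  rw [h2, Nat.mul_add_div (Nat.two_pow_pos i), Nat.mul_add_mod]

lemma divmod_high (n m : Nat) (hm : m < 2^n) : (2^n+m)/2^n%2 = 1 := by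
  rw [Nat.add_comm, Nat.add_div_right _ (Nat.two_pow_pos n), Nat.div_eq_of_lt hm]

lemma divmod_top (n m i : Nat) (hm : m < 2^n) (hi : n ≤ i) : m/2^i%2 = 0 := by
  rw [Nat.div_eq_of_lt (lt_of_lt_of_le hm (Nat.pow_le_pow_right (by norm_num) hi))]

lemma bit_test_low (n m i : Nat) (hi : i < n) :
    ((2 ^ n + m) &&& (1 <<< i) != 0) = (m &&& (1 <<< i) != 0) := by
  simp only [Nat.one_shiftLeft, Nat.and_two_pow, Nat.testBit_eq_decide_div_mod_eq,
    divmod_low n m i hi]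

lemma bit_test_high (n m : Nat) (hm : m < 2 ^ n) :
    ((2 ^ n + m) &&& (1 <<< n) != 0) = true := by
  simp only [Nat.one_shiftLeft, Nat.and_two_pow, Nat.testBit_eq_decide_div_mod_eq,
    divmod_high n m hm]
  simp

lemma bit_test_top (n m : Nat) (hm : m < 2 ^ n) :
    (m &&& (1 <<< n) != 0) = false := by
  have h := divmod_top n m n hm le_rfl
  simp only [Nat.one_shiftLeft, Nat.and_two_pow, Nat.testBit_eq_decide_div_mod_eq, h]
  simp

lemma shr_and_low (n m i : Nat) (hi : i < n) :
    ((2 ^ n + m) >>> i) &&& 1 = (m >>> i) &&& 1 := by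
  simp only [Nat.shiftRight_eq_div_pow, Nat.and_one_is_mod, divmod_low n m i hi]

lemma shr_and_high (n m : Nat) (hm : m < 2 ^ n) : ((2 ^ n + m) >>> n) &&& 1 = 1 := by
  simp only [Nat.shiftRight_eq_div_pow, Nat.and_one_is_mod, divmod_high n m hm]

lemma shr_and_top (n m : Nat) (hm : m < 2 ^ n) : (m >>> n) &&& 1 = 0 := by
  simp only [Nat.shiftRight_eq_div_pow, Nat.and_one_is_mod, divmod_top n m n hm le_rfl]

-- peeling the last element of sizes off the mask sum and the config
lemma maskSum_append_low (s : List Int) (x : Int) (m : Nat) (hm : m < 2 ^ s.length) :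
    pvMaskSum (s ++ [x]) m = pvMaskSum s m := by
  unfold pvMaskSum
  rw [List.length_append, List.length_singleton, List.range_succ, List.foldl_append]
  simp only [List.foldl_cons, List.foldl_nil, bit_test_top s.length m hm, Bool.false_eq_true,
    if_false]
  apply PySem.List.foldl_congr_mem
  intro acc i hi
  rw [List.mem_range] at hi
  rw [List.getD_append _ _ _ _ hi]

lemma maskSum_append_high (s : List Int) (x : Int) (m : Nat) (hm : m < 2 ^ s.length) :
    pvMaskSum (s ++ [x]) (2 ^ s.length + m) = pvMaskSum s m + x := by
  unfold pvMaskSum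
  rw [List.length_append, List.length_singleton, List.range_succ, List.foldl_append]
  simp only [List.foldl_cons, List.foldl_nil, bit_test_high s.length m hm, if_true,
    List.getD_append_right _ _ _ _ (le_refl s.length), Nat.sub_self, List.getD_cons_zero]
  congr 1
  apply PySem.List.foldl_congr_mem
  intro acc i hi
  rw [List.mem_range] at hi
  rw [List.getD_append _ _ _ _ hi, bit_test_low s.length m i hi]

lemma config_succ_low (n m : Nat) (hm : m < 2 ^ n) :
    pvConfig (n + 1) m = pvConfig n m ++ [0] := by
  unfold pvConfig
  rw [List.range_succ, List.map_append]
  simp only [List.map_cons, List.map_nil, shr_and_top n m hm, Nat.cast_zero]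

lemma config_succ_high (n m : Nat) (hm : m < 2 ^ n) :
    pvConfig (n + 1) (2 ^ n + m) = pvConfig n m ++ [1] := by
  unfold pvConfig
  rw [List.range_succ, List.map_append]
  rw [List.map_congr_left (g := fun i => (((m >>> i) &&& 1 : Nat) : Int)) (fun i hi => by
      rw [List.mem_range] at hi
      rw [shr_and_low n m i hi])]
  simp only [List.map_cons, List.map_nil, shr_and_high n m hm, Nat.cast_one]

lemma find?_congr_mem {α : Type} {l : List α} {p q : α → Bool} (h : ∀ a ∈ l, p a = q a) :
    l.find? p = l.find? q := by
  induction l with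
  | nil => rfl
  | cons a l ih =>
    rw [List.find?_cons, List.find?_cons, h a List.mem_cons_self,
      ih (fun b hb => h b (List.mem_cons_of_mem a hb))]

lemma main_find (r : List Int) (t : Int) :
    ((List.range (1 <<< r.length)).find? (fun m => pvMaskSum r.reverse m == t)).map
        (pvConfig r.length)
      = (pvSolve t r).map List.reverse := by
  induction r generalizing t with
  | nil =>
    by_cases ht : t = 0
    · subst ht; rfl
    · have h0 : ((pvMaskSum [] 0) == t) = false := by
        simp only [beq_eq_false_iff_ne, ne_eq]
        intro h
        exact ht (by rw [← h]; rfl)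
      simp [List.range_one, h0, pvSolve, ht]
  | cons x rs ih =>
    set n := rs.length with hn
    have hlen : (x :: rs).length = n + 1 := rfl
    have hrevlen : rs.reverse.length = n := by rw [List.length_reverse]
    have hrev : (x :: rs).reverse = rs.reverse ++ [x] := by simp
    have hpow : (1 : Nat) <<< (n + 1) = 2 ^ n + 2 ^ n := by
      rw [Nat.one_shiftLeft]; ring
    have hpow' : (1 : Nat) <<< n = 2 ^ n := Nat.one_shiftLeft n
    rw [hlen, hrev, hpow, List.range_add, List.find?_append]
    -- first half
    have hfirst : (List.range (2 ^ n)).find? (fun m => pvMaskSum (rs.reverse ++ [x]) m == t)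
        = (List.range (2 ^ n)).find? (fun m => pvMaskSum rs.reverse m == t) := by
      apply find?_congr_mem
      intro m hm
      rw [List.mem_range] at hm
      rw [maskSum_append_low rs.reverse x m (by rw [hrevlen]; exact hm)]
    -- second half
    have hsecond : ((List.range (2 ^ n)).map (2 ^ n + ·)).find?
          (fun m => pvMaskSum (rs.reverse ++ [x]) m == t)
        = ((List.range (2 ^ n)).find? (fun m => pvMaskSum rs.reverse m == t - x)).map
            (2 ^ n + ·) := by
      rw [List.find?_map]
      congr 1
      apply find?_congr_mem
      intro m hm
      rw [List.mem_range] at hm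
      show (pvMaskSum (rs.reverse ++ [x]) (2 ^ n + m) == t) = _
      have hms := maskSum_append_high rs.reverse x m (by rw [hrevlen]; exact hm)
      rw [hrevlen] at hms
      rw [hms]
      by_cases h : pvMaskSum rs.reverse m = t - x
      · have h' : pvMaskSum rs.reverse m + x = t := by omega
        simp [h]
      · have h' : ¬ (pvMaskSum rs.reverse m + x = t) := by omega
        simp [h']
        simp [h]
    rw [hfirst, hsecond]
    cases hc : (List.range (2 ^ n)).find? (fun m => pvMaskSum rs.reverse m == t) with
    | some m =>
      have hmlt : m < 2 ^ n := List.mem_range.mp (List.mem_of_find?_eq_some hc)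
      have := ih t
      rw [hpow', hc] at this
      cases hs : pvSolve t rs with
      | none => rw [hs] at this; simp at this
      | some c =>
        rw [hs] at this
        simp only [Option.map_some, Option.some.injEq] at this
        simp only [Option.some_or, Option.map_some, pvSolve, hs]
        rw [config_succ_low n m hmlt, this]
        simp [List.reverse_cons]
    | none =>
      have := ih t
      rw [hpow', hc] at this
      cases hs : pvSolve t rs with
      | some c => rw [hs] at this; simp at this
      | none =>
        simp only [Option.none_or]
        have ih2 := ih (t - x)
        rw [hpow'] at ih2
        show ((List.find? (fun m => pvMaskSum rs.reverse m == t - x) (List.range (2^n))).map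
          (2^n + ·)).map (pvConfig (n+1)) = (pvSolve t (x :: rs)).map List.reverse
        have hsolve : pvSolve t (x :: rs) = (pvSolve (t - x) rs).map (fun c => 1 :: c) := by
          simp [pvSolve, hs]
        rw [hsolve]
        cases hc2 : (List.range (2 ^ n)).find? (fun m => pvMaskSum rs.reverse m == t - x) with
        | none =>
          rw [hc2] at ih2
          cases hs2 : pvSolve (t - x) rs with
          | some c => rw [hs2] at ih2; simp at ih2
          | none => simp
        | some m =>
          have hmlt : m < 2 ^ n := List.mem_range.mp (List.mem_of_find?_eq_some hc2)
          rw [hc2] at ih2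
          cases hs2 : pvSolve (t - x) rs with
          | none => rw [hs2] at ih2; simp at ih2
          | some c =>
            rw [hs2] at ih2
            simp only [Option.map_some, Option.some.injEq] at ih2
            simp only [Option.map_some, Option.some.injEq]
            rw [config_succ_high n m hmlt, ih2]
            simp [List.reverse_cons]

theorem spec_aux (sizes : List Int) :
    partition_feasible_brute sizes = partition_feasible_brute_alt sizes := by
  unfold partition_feasible_brute partition_feasible_brute_alt
  by_cases hB : PySem.Int.mod sizes.sum 2 ≠ 0
  · rw [if_pos hB, if_pos hB]
  · rw [if_neg hB, if_neg hB]
    rw [loopA_eq_find, loopB_eq_stackRes sizes _ (by intro e he; simp_all),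
      pvStackRes, List.take_length]
    have h := main_find sizes.reverse (PySem.Int.floordiv sizes.sum 2)
    rw [List.reverse_reverse, List.length_reverse] at h
    cases hc : (List.range (1 <<< sizes.length)).find?
        (fun m => pvMaskSum sizes m == PySem.Int.floordiv sizes.sum 2) with
    | some m =>
      rw [hc] at h
      cases hs : pvSolve (PySem.Int.floordiv sizes.sum 2) sizes.reverse with
      | none => rw [hs] at h; simp at h
      | some c =>
        rw [hs] at h
        simp only [Option.map_some, Option.some.injEq] at h
        simp [h]
    | none =>
      rw [hc] at h
      cases hs : pvSolve (PySem.Int.floordiv sizes.sum 2) sizes.reverse with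
      | some c => rw [hs] at h; simp at h
      | none => simp [pvStackRes]

-- ===== VERDICT (by name: the statement is the Claim_ definition above) =====
theorem partition_feasible_brute_spec : Claim_equal_partition_feasible_brute := by
  intro sizes _
  exact spec_aux sizes
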